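-- pv_equiv track=rewrite | github.com/yassineS/TravelMap | tools/scripts/extract_pdf_hotels.py | parse_hotels
-- ===== SOURCE A (Python) =====
-- def parse_hotels(text, city_aliases):
--     # Normalize line breaks, split into paragraphs by blank line
--     paras = [p.strip() for p in text.split('\n\n') if p.strip()]
--     out = {k: [] for k in city_aliases}
--     lowered_paras = [p.lower() for p in paras]
--
--     for city, aliases in city_aliases.items():
--         for i, p in enumerate(lowered_paras):
--             for a in aliases:
--                 if a in p:
--                     # return the original paragraph (not lowercased)
--                     out[city].append(paras[i])
--                     break
--     return out
-- ===== SOURCE B (Python) =====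
-- def parse_hotels(text, city_aliases):
--     # Multi-pattern scan: build a prefix set (a trie encoded as a set of all
--     # alias prefixes) and an alias->cities map once, then scan each paragraph
--     # position by position, growing the current chunk while it is still the
--     # prefix of some alias -- no per-city, per-alias substring search.
--     paras = [p.strip() for p in text.split('\n\n') if p.strip()]
--     pairs = [(a, c) for c, aliases in city_aliases.items() for a in aliases]
--     prefixes = set()
--     for a, _c in pairs:
--         for k in range(len(a) + 1):
--             prefixes.add(a[:k])
--     ends = {}
--     for a, c in pairs:
--         ends.setdefault(a, []).append(c)
--     out = {c: [] for c in city_aliases}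
--     for p in paras:
--         lp = p.lower()
--         matched = set(ends.get('', []))
--         for i in range(len(lp)):
--             u = ''
--             for ch in lp[i:]:
--                 u = u + ch
--                 if u not in prefixes:
--                     break
--                 matched.update(ends.get(u, []))
--         for c in out:
--             if c in matched:
--                 out[c].append(p)
--     return out
-- ===== Notes on version B (the rewrite author's own statement) =====
-- stated objective: alternative
-- what changed: A's per-city, per-alias library substring search over every paragraph is replaced by a multi-pattern matcher: one precomputed alias-prefix set (a trie encoded as a set) plus an alias-to-cities map, and a single position-by-position scan of each paragraph that grows a chunk only while it is still a prefix of some alias.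
import Mathlib
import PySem

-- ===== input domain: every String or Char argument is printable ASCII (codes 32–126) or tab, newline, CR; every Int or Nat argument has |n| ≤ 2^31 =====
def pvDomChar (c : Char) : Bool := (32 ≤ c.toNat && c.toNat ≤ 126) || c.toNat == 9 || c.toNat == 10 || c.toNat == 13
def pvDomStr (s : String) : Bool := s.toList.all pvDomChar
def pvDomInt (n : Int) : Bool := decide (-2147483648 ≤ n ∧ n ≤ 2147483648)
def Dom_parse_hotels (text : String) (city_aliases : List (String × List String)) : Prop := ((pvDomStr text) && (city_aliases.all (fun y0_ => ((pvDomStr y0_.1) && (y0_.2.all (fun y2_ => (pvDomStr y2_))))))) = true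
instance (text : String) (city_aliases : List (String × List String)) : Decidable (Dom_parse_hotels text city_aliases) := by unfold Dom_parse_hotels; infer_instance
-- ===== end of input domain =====

-- B replaces A's per-city, per-alias substring search by a multi-pattern scan: it builds, once, a
-- set of all alias prefixes (a trie encoded as a set) and an alias→cities map, then scans each
-- paragraph position by position, growing a chunk while it is still an alias prefix (objective: alternative).

-- ===== PORT A =====
-- shared first line of both Pythons: [p.strip() for p in text.split('\n\n') if p.strip()]
-- ('\n\n' is a non-empty separator, so split? is always `some`; `.getD []` only totalizes)
def pvParas (text : String) : List String :=
  (((PySem.Str.split? text "\n\n").getD []).filter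
      (fun p => PySem.Str.strip p != "")).map PySem.Str.strip

def parse_hotels (text : String) (city_aliases : List (String × List String)) : List (String × List String) :=
  let paras := pvParas text
  let out0 : PySem.Dict String (List String) :=
    city_aliases.foldl (fun d kv => d.insert kv.1 ([] : List String)) PySem.Dict.empty
  let lowered := paras.map PySem.Str.lower
  let final := city_aliases.foldl (fun d kv =>
    (PySem.List.enumerate lowered).foldl (fun d ip =>
      -- 'for a in aliases: if a in p: out[city].append(paras[i]); break' appends paras[i]
      -- exactly once iff some alias occurs in p (the appended value does not depend on a);
      -- out[city] always exists (out has every key of city_aliases), so modify = append.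
      if kv.2.any (fun a => PySem.Str.isIn a ip.2) then
        d.modify kv.1 [] (fun l => l ++ [PySem.List.pyGetD paras ip.1 ""])
      else d) d) out0
  final.items

-- ===== PORT B =====
-- pairs = [(a, c) for c, aliases in city_aliases.items() for a in aliases]  (alias text as chars)
def pvPairs (city_aliases : List (String × List String)) : List (List Char × String) :=
  city_aliases.flatMap (fun ca => ca.2.map (fun a => (a.toList, ca.1)))

-- prefixes = {a[:k] for (a, _) in pairs for k in range(len(a)+1)}, built by the two Python loops
def pvPrefixes (pairs : List (List Char × String)) : PySem.Set (List Char) :=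
  pairs.foldl (fun s pr =>
    (PySem.List.pyRange 0 ((pr.1.length : Int) + 1)).foldl
      (fun s k => PySem.Set.add s (PySem.List.slice pr.1 none (some k))) s)
    PySem.Set.empty

-- ends: for a, c in pairs: ends.setdefault(a, []).append(c)
def pvEnds (pairs : List (List Char × String)) : PySem.Dict (List Char) (List String) :=
  pairs.foldl (fun d pr => d.modify pr.1 [] (fun l => l ++ [pr.2])) PySem.Dict.empty

-- the inner 'for ch in lp[i:]: u += ch; if u not in prefixes: break; matched.update(ends.get(u, []))'
def pvWalk (prefixes : PySem.Set (List Char)) (ends : PySem.Dict (List Char) (List String))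
    (u : List Char) (s : List Char) (m : PySem.Set String) : PySem.Set String :=
  match s with
  | [] => m
  | ch :: rest =>
    let u' := u ++ [ch]
    if PySem.Set.contains prefixes u' then
      pvWalk prefixes ends u' rest (PySem.Set.update m (ends.getD u' []))
    else m

-- matched = set(ends.get('', [])); for i in range(len(lp)): <pvWalk over lp[i:]>
def pvScan (prefixes : PySem.Set (List Char)) (ends : PySem.Dict (List Char) (List String))
    (lp : List Char) : PySem.Set String :=
  (PySem.List.pyRange 0 (lp.length : Int)).foldl
    (fun m i => pvWalk prefixes ends [] (PySem.List.slice lp (some i) none) m)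
    (PySem.Set.ofList (ends.getD [] []))

-- per-paragraph step: scan, then 'for c in out: if c in matched: out[c].append(p)'
def pvBStep (prefixes : PySem.Set (List Char)) (ends : PySem.Dict (List Char) (List String))
    (d : PySem.Dict String (List String)) (p : String) : PySem.Dict String (List String) :=
  let matched := pvScan prefixes ends (PySem.Str.lower p).toList
  d.keys.foldl (fun d c =>
    if PySem.Set.contains matched c then d.modify c [] (fun l => l ++ [p]) else d) d

def parse_hotels_alt (text : String) (city_aliases : List (String × List String)) : List (String × List String) :=
  let paras := pvParas text
  let pairs := pvPairs city_aliases
  let prefixes := pvPrefixes pairs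
  let ends := pvEnds pairs
  let out0 : PySem.Dict String (List String) :=
    city_aliases.foldl (fun d kv => d.insert kv.1 ([] : List String)) PySem.Dict.empty
  let final := paras.foldl (pvBStep prefixes ends) out0
  final.items

-- ===== PRECONDITION & SPEC =====
-- In Python city_aliases is a dict, whose keys are necessarily distinct; Pre_ restricts the
-- association-list argument to the lists that actually represent a dict (no duplicate city keys).
def Pre_parse_hotels (text : String) (city_aliases : List (String × List String)) : Prop :=
  (city_aliases.map (fun ca => ca.1)).Nodup
instance (text : String) (city_aliases : List (String × List String)) : Decidable (Pre_parse_hotels text city_aliases) := by unfold Pre_parse_hotels; infer_instance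

def pvWitness_parse_hotels : String × (List (String × List String)) :=
  ("Hotel Ritz in PARIS\n\nLima hostel", [("Paris", ["paris", "eiffel"]), ("Lima", ["lima"])])

def Spec_parse_hotels (text : String) (city_aliases : List (String × List String)) (out : List (String × List String)) : Prop := out = parse_hotels_alt text city_aliases
instance (text : String) (city_aliases : List (String × List String)) (out : List (String × List String)) : Decidable (Spec_parse_hotels text city_aliases out) := by unfold Spec_parse_hotels; infer_instance

-- ===== CLAIM (what is proved, stated in full; the proofs are below) =====
def Claim_equal_parse_hotels : Prop := ∀ (text : String) (city_aliases : List (String × List String)), Dom_parse_hotels text city_aliases → Pre_parse_hotels text city_aliases → Spec_parse_hotels text city_aliases (parse_hotels text city_aliases)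

-- ===== LEMMAS AND PROOFS =====

-- the per-city list both programs compute: paragraphs some alias of which occurs lowercased
def pvM (paras : List String) (als : List String) : List String :=
  paras.filter (fun p => als.any (fun a => PySem.Str.isIn a (PySem.Str.lower p)))

-- a fold over enumerate(map f big) from index n that looks up big[i] is a fold over the suffix itself
lemma pv_enum_fold {δ : Type} (big : List String) (f : String → String) (G : δ → String → String → δ) :
    ∀ (t : List String) (n : Nat) (d : δ), t = big.drop n →
      (PySem.List.enumerate (t.map f) (n : Int)).foldl
        (fun d ip => G d ip.2 (PySem.List.pyGetD big ip.1 "")) d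
      = t.foldl (fun d p => G d (f p) p) d := by
  intro t
  induction t with
  | nil => intro n d _; rfl
  | cons x t ih =>
    intro n d ht
    have hx : big[n]? = some x := by
      have := congrArg List.head? ht
      simpa [List.head?_drop] using this.symm
    have ht' : t = big.drop (n + 1) := by
      have := congrArg List.tail ht
      simpa [List.tail_drop] using this
    rw [List.map_cons, PySem.List.enumerate_cons, List.foldl_cons, List.foldl_cons]
    have hget : PySem.List.pyGetD big ((n : Nat) : Int) "" = x := by
      rw [PySem.List.pyGetD_natCast, List.getD_eq_getElem?_getD, hx]; rfl
    have hcast : ((n : Nat) : Int) + 1 = (((n + 1 : Nat)) : Int) := by push_cast; ring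
    rw [hget, hcast, ih (n + 1) _ ht']

-- a Set.update by elements already present changes nothing
lemma pv_update_self {α : Type} [BEq α] [LawfulBEq α] :
    ∀ (xs : List α) (s : PySem.Set α), (∀ x ∈ xs, x ∈ s) → PySem.Set.update s xs = s := by
  intro xs
  induction xs with
  | nil => intro s _; rfl
  | cons x t ih =>
    intro s h
    have hadd : PySem.Set.add s x = s := by
      simp [PySem.Set.add, PySem.Set.contains, h x (by simp)]
    have : PySem.Set.update s (x :: t) = PySem.Set.update (PySem.Set.add s x) t := rfl
    rw [this, hadd]
    exact ih s (fun y hy => h y (by simp [hy]))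

-- the inner enumerate-loop of A, seen through getD
lemma pv_inner_getD (paras : List String) (city : String) (als : List String)
    (d : PySem.Dict String (List String)) (c : String) :
    ((PySem.List.enumerate (paras.map PySem.Str.lower)).foldl (fun d ip =>
        if als.any (fun a => PySem.Str.isIn a ip.2) then
          d.modify city [] (fun l => l ++ [PySem.List.pyGetD paras ip.1 ""])
        else d) d).getD c []
    = d.getD c [] ++ (if city = c then pvM paras als else []) := by
  have h0 := pv_enum_fold paras PySem.Str.lower
      (fun d lp p => if als.any (fun a => PySem.Str.isIn a lp) then
          d.modify city [] (fun l => l ++ [p]) else d)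
      paras 0 d (by simp)
  simp only [Nat.cast_zero] at h0
  rw [h0, PySem.List.foldl_if_eq_foldl_filter]
  have h1 : (paras.filter (fun p => als.any (fun a => PySem.Str.isIn a (PySem.Str.lower p)))).foldl
        (fun d p => d.modify city [] (fun l => l ++ [p])) d
      = ((paras.filter (fun p => als.any (fun a => PySem.Str.isIn a (PySem.Str.lower p)))).map
          (fun p => (city, p))).foldl (fun d pr => d.modify pr.1 [] (fun l => l ++ [pr.2])) d := by
    rw [List.foldl_map]
  rw [h1, PySem.Dict.getD_foldl_modify_append]
  by_cases hc : city = c <;>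
    simp [List.filter_map, Function.comp, hc, pvM]

-- the inner enumerate-loop of A does not change the key list when city is already a key
lemma pv_inner_keys (paras : List String) (city : String) (als : List String)
    (d : PySem.Dict String (List String)) (h : city ∈ d.keys) :
    ((PySem.List.enumerate (paras.map PySem.Str.lower)).foldl (fun d ip =>
        if als.any (fun a => PySem.Str.isIn a ip.2) then
          d.modify city [] (fun l => l ++ [PySem.List.pyGetD paras ip.1 ""])
        else d) d).keys = d.keys := by
  have h0 := pv_enum_fold paras PySem.Str.lower
      (fun d lp p => if als.any (fun a => PySem.Str.isIn a lp) then
          d.modify city [] (fun l => l ++ [p]) else d)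
      paras 0 d (by simp)
  simp only [Nat.cast_zero] at h0
  rw [h0, PySem.List.foldl_if_eq_foldl_filter]
  have h1 : (paras.filter (fun p => als.any (fun a => PySem.Str.isIn a (PySem.Str.lower p)))).foldl
        (fun d p => d.modify city [] (fun l => l ++ [p])) d
      = ((paras.filter (fun p => als.any (fun a => PySem.Str.isIn a (PySem.Str.lower p)))).map
          (fun p => (city, p))).foldl (fun d pr => d.modify pr.1 [] (fun l => l ++ [pr.2])) d := by
    rw [List.foldl_map]
  rw [h1]
  have hk := PySem.Dict.keys_foldl_modify_key
      (l := (paras.filter (fun p => als.any (fun a => PySem.Str.isIn a (PySem.Str.lower p)))).map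
          (fun p => (city, p)))
      (key := fun pr : String × String => pr.1) (d0 := ([] : List String))
      (f := fun _ pr => fun v => v ++ [pr.2]) (d := d)
  rw [hk]
  apply pv_update_self
  intro x hx
  simp only [List.map_map, List.mem_map] at hx
  obtain ⟨p, -, rfl⟩ := hx
  exact h

lemma pv_outer_getD (paras : List String) (C : List (String × List String)) :
    ∀ (d : PySem.Dict String (List String)) (c : String),
    (C.foldl (fun d kv =>
        (PySem.List.enumerate (paras.map PySem.Str.lower)).foldl (fun d ip =>
          if kv.2.any (fun a => PySem.Str.isIn a ip.2) then
            d.modify kv.1 [] (fun l => l ++ [PySem.List.pyGetD paras ip.1 ""])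
          else d) d) d).getD c []
    = d.getD c [] ++ ((C.filter (fun ca => ca.1 = c)).map (fun ca => pvM paras ca.2)).flatten := by
  induction C with
  | nil => intro d c; simp
  | cons hd tl ih =>
    intro d c
    rw [List.foldl_cons, ih, pv_inner_getD]
    by_cases hc : hd.1 = c <;> simp [hc, List.append_assoc]

lemma pv_outer_keys (paras : List String) (C : List (String × List String)) :
    ∀ (d : PySem.Dict String (List String)), (∀ ca ∈ C, ca.1 ∈ d.keys) →
    (C.foldl (fun d kv =>
        (PySem.List.enumerate (paras.map PySem.Str.lower)).foldl (fun d ip =>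
          if kv.2.any (fun a => PySem.Str.isIn a ip.2) then
            d.modify kv.1 [] (fun l => l ++ [PySem.List.pyGetD paras ip.1 ""])
          else d) d) d).keys = d.keys := by
  induction C with
  | nil => intro d _; rfl
  | cons hd tl ih =>
    intro d h
    rw [List.foldl_cons]
    have hk := pv_inner_keys paras hd.1 hd.2 d (h hd (by simp))
    exact (ih _ (fun ca hca => by rw [hk]; exact h ca (by simp [hca]))).trans hk

lemma pv_out0_getD (C : List (String × List String)) :
    ∀ (d : PySem.Dict String (List String)) (c : String), d.getD c [] = [] →
    (C.foldl (fun d kv => d.insert kv.1 ([] : List String)) d).getD c [] = [] := by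
  induction C with
  | nil => intro d c h; exact h
  | cons hd tl ih =>
    intro d c h
    rw [List.foldl_cons]
    exact ih _ c (by rw [PySem.Dict.getD_insert]; split <;> simp [h])

lemma pv_out0_keys (C : List (String × List String)) :
    (C.foldl (fun d kv => d.insert kv.1 ([] : List String)) PySem.Dict.empty).keys
      = PySem.Set.ofList (C.map (fun ca => ca.1)) := by
  have hk := PySem.Dict.keys_foldl_insert_key (l := C)
      (key := fun ca : String × List String => ca.1)
      (f := fun _ _ => ([] : List String)) (d := PySem.Dict.empty)
  rw [hk, PySem.Set.ofList_eq_foldl]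
  rfl

-- with distinct keys, filtering C for one key gives exactly its entry
lemma pv_filter_key (C : List (String × List String))
    (hnd : (C.map (fun ca => ca.1)).Nodup) {ca : String × List String} (h : ca ∈ C) :
    C.filter (fun x => x.1 = ca.1) = [ca] := by
  induction C with
  | nil => cases h
  | cons hd tl ih =>
    rw [List.map_cons, List.nodup_cons] at hnd
    rcases List.mem_cons.mp h with rfl | htl
    · rw [List.filter_cons_of_pos (by simp)]
      congr 1
      rw [List.filter_eq_nil_iff]
      intro x hx
      simp only [decide_eq_true_eq]
      intro hx1
      exact hnd.1 (hx1 ▸ List.mem_map_of_mem hx)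
    · have hne : ¬ (hd.1 = ca.1) := fun he => hnd.1 (he ▸ List.mem_map_of_mem htl)
      rw [List.filter_cons_of_neg (by simp [hne])]
      exact ih hnd.2 htl

-- A computes, for each city in order, exactly its matched-paragraph list
lemma pv_A_eq (text : String) (C : List (String × List String))
    (hpre : (C.map (fun ca => ca.1)).Nodup) :
    parse_hotels text C = C.map (fun ca => (ca.1, pvM (pvParas text) ca.2)) := by
  simp only [parse_hotels]
  set paras := pvParas text with hparas
  set out0 : PySem.Dict String (List String) :=
    C.foldl (fun d kv => d.insert kv.1 ([] : List String)) PySem.Dict.empty with hout0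
  have hkeys0 : out0.keys = C.map (fun ca => ca.1) := by
    rw [hout0, pv_out0_keys, PySem.Set.ofList_eq_self_of_nodup _ hpre]
  have hmem : ∀ ca ∈ C, ca.1 ∈ out0.keys := fun ca hca => by
    rw [hkeys0]; exact List.mem_map_of_mem hca
  have hfkeys := (pv_outer_keys paras C out0 hmem).trans hkeys0
  have hget : ∀ ca ∈ C, (C.foldl (fun d kv =>
      (PySem.List.enumerate (paras.map PySem.Str.lower)).foldl (fun d ip =>
        if kv.2.any (fun a => PySem.Str.isIn a ip.2) then
          d.modify kv.1 [] (fun l => l ++ [PySem.List.pyGetD paras ip.1 ""])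
        else d) d) out0).getD ca.1 [] = pvM paras ca.2 := by
    intro ca hca
    have h0 : out0.getD ca.1 [] = [] := by
      rw [hout0]; exact pv_out0_getD C _ _ (PySem.Dict.getD_empty _ _)
    rw [pv_outer_getD, h0, pv_filter_key C hpre hca]
    simp
  rw [PySem.Dict.items_eq_map_keys _ (hfkeys.symm ▸ hpre) ([] : List String), hfkeys,
      List.map_map]
  refine List.map_congr_left (fun ca hca => ?_)
  dsimp only [Function.comp]
  rw [hget ca hca]

-- ---------- B-side lemmas ----------

-- membership in pairs
lemma pv_mem_pairs (C : List (String × List String)) (a : List Char) (c : String) :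
    (a, c) ∈ pvPairs C ↔ ∃ ca ∈ C, ca.1 = c ∧ ∃ al ∈ ca.2, al.toList = a := by
  simp only [pvPairs, List.mem_flatMap, List.mem_map, Prod.mk.injEq]
  constructor
  · rintro ⟨ca, hca, x, hx, rfl, rfl⟩
    exact ⟨ca, hca, rfl, x, hx, rfl⟩
  · rintro ⟨ca, hca, rfl, x, hx, rfl⟩
    exact ⟨ca, hca, x, hx, rfl, rfl⟩

-- membership in the ends dict
lemma pv_mem_ends (pairs : List (List Char × String)) (a : List Char) (c : String) :
    c ∈ (pvEnds pairs).getD a [] ↔ (a, c) ∈ pairs := by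
  rw [pvEnds, PySem.Dict.getD_foldl_modify_append, PySem.Dict.getD_empty]
  simp only [List.nil_append, List.mem_map, List.mem_filter, beq_iff_eq]
  constructor
  · rintro ⟨pr, ⟨hpr, rfl⟩, rfl⟩; exact hpr
  · intro h; exact ⟨(a, c), ⟨h, rfl⟩, rfl⟩

-- membership in the prefix set
lemma pv_mem_prefixes (pairs : List (List Char × String)) (u : List Char) :
    u ∈ pvPrefixes pairs ↔ ∃ pr ∈ pairs, u <+: pr.1 := by
  rw [pvPrefixes]
  have main : ∀ (l : List (List Char × String)) (s : PySem.Set (List Char)),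
      u ∈ l.foldl (fun s pr =>
        (PySem.List.pyRange 0 ((pr.1.length : Int) + 1)).foldl
          (fun s k => PySem.Set.add s (PySem.List.slice pr.1 none (some k))) s) s
      ↔ u ∈ s ∨ ∃ pr ∈ l, u <+: pr.1 := by
    intro l
    induction l with
    | nil => intro s; simp
    | cons hd tl ih =>
      intro s
      rw [List.foldl_cons, ih]
      have hinner : u ∈ (PySem.List.pyRange 0 ((hd.1.length : Int) + 1)).foldl
          (fun s k => PySem.Set.add s (PySem.List.slice hd.1 none (some k))) s
          ↔ u ∈ s ∨ u <+: hd.1 := by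
        rw [PySem.Set.mem_foldl_add (PySem.List.pyRange 0 ((hd.1.length : Int) + 1))
          (fun k => PySem.List.slice hd.1 none (some k)) s u]
        constructor
        · rintro (h | ⟨k, hk, rfl⟩)
          · exact Or.inl h
          · obtain ⟨hk0, -⟩ := PySem.List.mem_pyRange_one.mp hk
            refine Or.inr ?_
            have : PySem.List.slice hd.1 none (some k) = hd.1.take k.toNat := by
              simp [pysem, hk0]
            rw [this]
            exact List.take_prefix _ _
        · rintro (h | h)
          · exact Or.inl h
          · refine Or.inr ⟨(u.length : Int), PySem.List.mem_pyRange_one.mpr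
              ⟨by positivity, by have := h.length_le; omega⟩, ?_⟩
            have : PySem.List.slice hd.1 none (some (u.length : Int)) = hd.1.take u.length := by
              simp [pysem]
            rw [this]
            exact List.prefix_iff_eq_take.mp h
      rw [hinner]
      constructor
      · rintro (⟨h | h⟩ | ⟨pr, hpr, h⟩)
        · exact Or.inl h
        · exact Or.inr ⟨hd, by simp, h⟩
        · exact Or.inr ⟨pr, by simp [hpr], h⟩
      · rintro (h | ⟨pr, hpr, h⟩)
        · exact Or.inl (Or.inl h)
        · rcases List.mem_cons.mp hpr with rfl | htl
          · exact Or.inl (Or.inr h)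
          · exact Or.inr ⟨pr, htl, h⟩
  rw [main]
  simp [PySem.Set.empty]

-- what one inner walk collects
lemma pv_walk_mem (P : PySem.Set (List Char)) (E : PySem.Dict (List Char) (List String)) (c : String) :
    ∀ (s u : List Char) (m : PySem.Set String),
    c ∈ pvWalk P E u s m ↔ c ∈ m ∨ ∃ t, t ≠ [] ∧ t <+: s ∧
      (∀ r, r ≠ [] → r <+: t → (u ++ r) ∈ P) ∧ c ∈ E.getD (u ++ t) [] := by
  intro s
  induction s with
  | nil =>
    intro u m
    simp only [pvWalk]
    constructor
    · exact Or.inl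
    · rintro (h | ⟨t, ht, hpre, -, -⟩)
      · exact h
      · cases List.prefix_nil.mp hpre; exact absurd rfl ht
  | cons ch rest ih =>
    intro u m
    simp only [pvWalk]
    by_cases hP : PySem.Set.contains P (u ++ [ch]) = true
    · rw [if_pos hP, ih]
      have hPm : (u ++ [ch]) ∈ P := (PySem.Set.contains_iff _ _).mp hP
      constructor
      · rintro (h | ⟨t', ht', hpre', hsteps', hend'⟩)
        · rcases (PySem.Set.mem_update _ _ _).mp h with h | h
          · exact Or.inl h
          · refine Or.inr ⟨[ch], by simp, by simp, ?_, by simpa using h⟩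
            intro r hr hrp
            rcases List.prefix_cons_iff.mp hrp with rfl | hrp'
            · exact absurd rfl hr
            · obtain ⟨r', rfl, hr'⟩ := hrp'
              cases List.prefix_nil.mp hr'
              simpa using hPm
        · refine Or.inr ⟨ch :: t', by simp, List.cons_prefix_cons.mpr ⟨rfl, hpre'⟩, ?_, ?_⟩
          · intro r hr hrp
            rcases List.prefix_cons_iff.mp hrp with rfl | hrp'
            · exact absurd rfl hr
            · obtain ⟨r', rfl, hr'⟩ := hrp'
              by_cases hr0 : r' = []
              · subst hr0; simpa using hPm
              · have := hsteps' r' hr0 hr'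
                simpa [List.append_assoc] using this
          · simpa [List.append_assoc] using hend'
      · rintro (h | ⟨t, ht, hpre, hsteps, hend⟩)
        · exact Or.inl ((PySem.Set.mem_update _ _ _).mpr (Or.inl h))
        · obtain ⟨t', rfl, hpre'⟩ : ∃ t', t = ch :: t' ∧ t' <+: rest := by
            rcases List.prefix_cons_iff.mp hpre with rfl | h'
            · exact absurd rfl ht
            · obtain ⟨t', rfl, h''⟩ := h'
              exact ⟨t', rfl, h''⟩
          by_cases ht0 : t' = []
          · subst ht0
            exact Or.inl ((PySem.Set.mem_update _ _ _).mpr (Or.inr (by simpa using hend)))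
          · refine Or.inr ⟨t', ht0, hpre', ?_, by simpa [List.append_assoc] using hend⟩
            intro r hr hrp
            have := hsteps (ch :: r) (by simp) (List.cons_prefix_cons.mpr ⟨rfl, hrp⟩)
            simpa [List.append_assoc] using this
    · rw [if_neg hP]
      constructor
      · exact Or.inl
      · rintro (h | ⟨t, ht, hpre, hsteps, -⟩)
        · exact h
        · obtain ⟨t', rfl, -⟩ : ∃ t', t = ch :: t' ∧ t' <+: rest := by
            rcases List.prefix_cons_iff.mp hpre with rfl | h'
            · exact absurd rfl ht
            · obtain ⟨t', rfl, h''⟩ := h'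
              exact ⟨t', rfl, h''⟩
          have := hsteps [ch] (by simp) (by simp)
          exact absurd ((PySem.Set.contains_iff _ _).mpr this) hP

-- a fold whose step adds an m-independent condition
lemma pv_foldl_mem {β : Type} (g : PySem.Set String → β → PySem.Set String) (X : β → Prop) (c : String)
    (h : ∀ m i, c ∈ g m i ↔ c ∈ m ∨ X i) :
    ∀ (l : List β) (m : PySem.Set String), c ∈ l.foldl g m ↔ c ∈ m ∨ ∃ i ∈ l, X i := by
  intro l
  induction l with
  | nil => intro m; simp
  | cons hd tl ih =>
    intro m
    rw [List.foldl_cons, ih, h]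
    constructor
    · rintro (⟨h' | h'⟩ | ⟨i, hi, hx⟩)
      · exact Or.inl h'
      · exact Or.inr ⟨hd, by simp, h'⟩
      · exact Or.inr ⟨i, by simp [hi], hx⟩
    · rintro (h' | ⟨i, hi, hx⟩)
      · exact Or.inl (Or.inl h')
      · rcases List.mem_cons.mp hi with rfl | hi'
        · exact Or.inl (Or.inr hx)
        · exact Or.inr ⟨i, hi', hx⟩

-- the scan of one paragraph collects exactly the cities one of whose aliases occurs
lemma pv_scan_mem (pairs : List (List Char × String)) (lp : List Char) (c : String) :
    c ∈ pvScan (pvPrefixes pairs) (pvEnds pairs) lp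
      ↔ ∃ pr ∈ pairs, pr.2 = c ∧ PySem.Chars.isIn pr.1 lp = true := by
  have hcl : ∀ (t : List Char), c ∈ (pvEnds pairs).getD t [] →
      ∀ r, r <+: t → r ∈ pvPrefixes pairs := by
    intro t hc r hr
    rw [pv_mem_prefixes]
    exact ⟨(t, c), (pv_mem_ends pairs t c).mp hc, hr⟩
  rw [pvScan]
  rw [pv_foldl_mem
    (g := fun m i => pvWalk (pvPrefixes pairs) (pvEnds pairs) [] (PySem.List.slice lp (some i) none) m)
    (X := fun i : Int => ∃ t, t ≠ [] ∧ t <+: PySem.List.slice lp (some i) none ∧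
        c ∈ (pvEnds pairs).getD t []) c
    (by
      intro m i
      rw [pv_walk_mem]
      constructor
      · rintro (h | ⟨t, ht, hp, -, he⟩)
        · exact Or.inl h
        · exact Or.inr ⟨t, ht, hp, by simpa using he⟩
      · rintro (h | ⟨t, ht, hp, he⟩)
        · exact Or.inl h
        · refine Or.inr ⟨t, ht, hp, ?_, by simpa using he⟩
          intro r hr hrt
          simpa using hcl t (by simpa using he) r hrt)]
  rw [PySem.Set.mem_ofList]
  constructor
  · rintro (h | ⟨i, hi, t, ht, hp, he⟩)
    · exact ⟨([], c), (pv_mem_ends pairs [] c).mp h, rfl, PySem.Chars.isIn_nil lp⟩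
    · obtain ⟨hi0, -⟩ := PySem.List.mem_pyRange_one.mp hi
      have hslice : PySem.List.slice lp (some i) none = lp.drop i.toNat := by
        simp [pysem, hi0]
      rw [hslice] at hp
      refine ⟨(t, c), (pv_mem_ends pairs t c).mp he, rfl, ?_⟩
      exact (PySem.Chars.exists_prefix_drop_iff_isIn t lp).mp ⟨i.toNat, hp⟩
  · rintro ⟨⟨t, c'⟩, hpr, rfl, hin⟩
    by_cases ht : t = []
    · subst ht
      exact Or.inl ((pv_mem_ends pairs [] _).mpr hpr)
    · obtain ⟨j, hj⟩ := (PySem.Chars.exists_prefix_drop_iff_isIn t lp).mpr hin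
      have hjlt : j < lp.length := by
        by_contra hge
        rw [List.drop_eq_nil_of_le (by omega)] at hj
        exact ht (List.prefix_nil.mp hj)
      refine Or.inr ⟨(j : Int), PySem.List.mem_pyRange_one.mpr
        ⟨by positivity, by exact_mod_cast hjlt⟩, t, ht, ?_, (pv_mem_ends pairs t _).mpr hpr⟩
      have hslice : PySem.List.slice lp (some ((j : Nat) : Int)) none = lp.drop j := by
        simp [pysem]
      rw [hslice]
      exact hj

-- for a city of C (distinct keys), the scan test coincides with A's any-alias test
lemma pv_scan_contains (C : List (String × List String))
    (hnd : (C.map (fun ca => ca.1)).Nodup) {ca : String × List String} (hca : ca ∈ C) (p : String) :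
    PySem.Set.contains (pvScan (pvPrefixes (pvPairs C)) (pvEnds (pvPairs C))
        (PySem.Str.lower p).toList) ca.1
      = ca.2.any (fun a => PySem.Str.isIn a (PySem.Str.lower p)) := by
  rw [Bool.eq_iff_iff, PySem.Set.contains_iff, pv_scan_mem, List.any_eq_true]
  constructor
  · rintro ⟨⟨a, c'⟩, hpr, rfl, hin⟩
    obtain ⟨cb, hcb, hc1, x, hx, rfl⟩ := (pv_mem_pairs C a _).mp hpr
    have hcb' : cb = ca := List.inj_on_of_nodup_map hnd hcb hca hc1
    subst hcb'
    exact ⟨x, hx, by rw [PySem.Str.isIn_eq]; exact hin⟩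
  · rintro ⟨a, ha, hin⟩
    refine ⟨(a.toList, ca.1), (pv_mem_pairs C a.toList ca.1).mpr
      ⟨ca, hca, rfl, a, ha, rfl⟩, rfl, ?_⟩
    rw [PySem.Str.isIn_eq] at hin
    exact hin

-- a Nodup list filtered for one of its elements
lemma pv_filter_self (l : List String) (hnd : l.Nodup) (c : String) (hc : c ∈ l) :
    l.filter (fun x => x == c) = [c] := by
  induction l with
  | nil => cases hc
  | cons hd tl ih =>
    rw [List.nodup_cons] at hnd
    rcases List.mem_cons.mp hc with rfl | htl
    · rw [List.filter_cons_of_pos (by simp)]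
      congr 1
      rw [List.filter_eq_nil_iff]
      intro x hx
      simp only [beq_iff_eq]
      intro h
      exact hnd.1 (h ▸ hx)
    · have hne : hd ≠ c := fun he => hnd.1 (he ▸ htl)
      rw [List.filter_cons_of_neg (by simp [hne])]
      exact ih hnd.2 htl

-- one pvBStep keeps the key list
lemma pv_bstep_keys (P : PySem.Set (List Char)) (E : PySem.Dict (List Char) (List String))
    (d : PySem.Dict String (List String)) (p : String) :
    (pvBStep P E d p).keys = d.keys := by
  rw [pvBStep]
  rw [PySem.List.foldl_if_eq_foldl_filter]
  have h1 : (d.keys.filter fun c => PySem.Set.contains (pvScan P E (PySem.Str.lower p).toList) c).foldl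
        (fun d c => d.modify c [] (fun l => l ++ [p])) d
      = ((d.keys.filter fun c => PySem.Set.contains (pvScan P E (PySem.Str.lower p).toList) c).map
          (fun c => (c, p))).foldl (fun d pr => d.modify pr.1 [] (fun l => l ++ [pr.2])) d := by
    rw [List.foldl_map]
  rw [h1]
  rw [PySem.Dict.keys_foldl_modify_key]
  apply pv_update_self
  intro x hx
  simp only [List.map_map, List.mem_map, Function.comp] at hx
  obtain ⟨y, hy, rfl⟩ := hx
  exact (List.mem_filter.mp hy).1

-- getD through one pvBStep, at a key of d
set_option maxHeartbeats 1000000 in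
lemma pv_bstep_getD (P : PySem.Set (List Char)) (E : PySem.Dict (List Char) (List String))
    (d : PySem.Dict String (List String)) (p : String) (c : String)
    (hnd : d.keys.Nodup) (hc : c ∈ d.keys) :
    (pvBStep P E d p).getD c []
      = d.getD c [] ++ (if PySem.Set.contains (pvScan P E (PySem.Str.lower p).toList) c then [p] else []) := by
  rw [pvBStep]
  rw [PySem.List.foldl_if_eq_foldl_filter]
  have h1 : (d.keys.filter fun c => PySem.Set.contains (pvScan P E (PySem.Str.lower p).toList) c).foldl
        (fun d c => d.modify c [] (fun l => l ++ [p])) d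
      = ((d.keys.filter fun c => PySem.Set.contains (pvScan P E (PySem.Str.lower p).toList) c).map
          (fun c => (c, p))).foldl (fun d pr => d.modify pr.1 [] (fun l => l ++ [pr.2])) d := by
    rw [List.foldl_map]
  rw [h1]
  rw [PySem.Dict.getD_foldl_modify_append]
  congr 1
  rw [List.filter_map]
  have hcomm : ((d.keys.filter fun c' => PySem.Set.contains (pvScan P E (PySem.Str.lower p).toList) c').filter
        ((fun pr : String × String => pr.1 == c) ∘ (fun c' => (c', p))))
      = ((d.keys.filter fun x => x == c).filter
          fun c' => PySem.Set.contains (pvScan P E (PySem.Str.lower p).toList) c') := by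
    rw [List.filter_comm]
    rfl
  rw [hcomm, pv_filter_self d.keys hnd c hc]
  by_cases hm : PySem.Set.contains (pvScan P E (PySem.Str.lower p).toList) c = true
  · rw [List.filter_cons_of_pos (by simpa using hm)]
    simp
    simpa using (PySem.Set.contains_iff _ _).mp hm
  · rw [List.filter_cons_of_neg (by simpa using hm)]
    simp
    simpa using fun h => hm ((PySem.Set.contains_iff _ _).mpr (by simpa using h))

-- the paragraph fold of B: keys are preserved
lemma pv_bfold_keys (P : PySem.Set (List Char)) (E : PySem.Dict (List Char) (List String)) :
    ∀ (paras : List String) (d : PySem.Dict String (List String)),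
    (paras.foldl (pvBStep P E) d).keys = d.keys := by
  intro paras
  induction paras with
  | nil => intro d; rfl
  | cons p t ih => intro d; rw [List.foldl_cons, ih, pv_bstep_keys]

-- the paragraph fold of B: getD at a key of d
set_option maxHeartbeats 1000000 in
lemma pv_bfold_getD (P : PySem.Set (List Char)) (E : PySem.Dict (List Char) (List String)) :
    ∀ (paras : List String) (d : PySem.Dict String (List String)) (c : String),
    d.keys.Nodup → c ∈ d.keys →
    (paras.foldl (pvBStep P E) d).getD c []
      = d.getD c [] ++ paras.filter
          (fun p => PySem.Set.contains (pvScan P E (PySem.Str.lower p).toList) c) := by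
  intro paras
  induction paras with
  | nil => intro d c _ _; simp
  | cons p t ih =>
    intro d c hnd hc
    rw [List.foldl_cons, ih _ c (by rw [pv_bstep_keys]; exact hnd) (by rw [pv_bstep_keys]; exact hc),
      pv_bstep_getD P E d p c hnd hc]
    by_cases hm : PySem.Set.contains (pvScan P E (PySem.Str.lower p).toList) c = true
    · rw [List.filter_cons_of_pos (by simpa using hm), if_pos hm, List.append_assoc,
        List.singleton_append]
    · rw [List.filter_cons_of_neg (by simpa using hm), if_neg hm, List.append_nil]

-- B computes, for each city in order, exactly its matched-paragraph list
set_option maxHeartbeats 1000000 in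
lemma pv_B_eq (text : String) (C : List (String × List String))
    (hpre : (C.map (fun ca => ca.1)).Nodup) :
    parse_hotels_alt text C = C.map (fun ca => (ca.1, pvM (pvParas text) ca.2)) := by
  simp only [parse_hotels_alt]
  set paras := pvParas text with hparas
  set out0 : PySem.Dict String (List String) :=
    C.foldl (fun d kv => d.insert kv.1 ([] : List String)) PySem.Dict.empty with hout0
  have hkeys0 : out0.keys = C.map (fun ca => ca.1) := by
    rw [hout0, pv_out0_keys, PySem.Set.ofList_eq_self_of_nodup _ hpre]
  have hnd0 : out0.keys.Nodup := by rw [hkeys0]; exact hpre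
  have hfkeys : (paras.foldl (pvBStep (pvPrefixes (pvPairs C)) (pvEnds (pvPairs C))) out0).keys
      = C.map (fun ca => ca.1) := by rw [pv_bfold_keys, hkeys0]
  rw [PySem.Dict.items_eq_map_keys _ (hfkeys.symm ▸ hpre) ([] : List String), hfkeys,
      List.map_map]
  refine List.map_congr_left (fun ca hca => ?_)
  dsimp only [Function.comp]
  have hc : ca.1 ∈ out0.keys := by rw [hkeys0]; exact List.mem_map_of_mem hca
  rw [pv_bfold_getD _ _ paras out0 ca.1 hnd0 hc]
  have h0 : out0.getD ca.1 [] = [] := by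
    rw [hout0]; exact pv_out0_getD C _ _ (PySem.Dict.getD_empty _ _)
  rw [h0, List.nil_append]
  congr 1
  rw [pvM]
  exact List.filter_congr (fun p _ => pv_scan_contains C hpre hca p)

-- ===== VERDICT =====
theorem parse_hotels_spec : Claim_equal_parse_hotels := by
  intro text C _ hpre
  unfold Spec_parse_hotels
  rw [pv_A_eq text C hpre, pv_B_eq text C hpre]
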